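-- pv_equiv track=rewrite | github.com/lr580/llm4traffic_prediction | utils/common/tex.py | unwrap_added
-- ===== SOURCE A (Python) =====
-- from typing import List, Optional, Dict
-- from typing import List
--
-- def unwrap_added(text: str) -> str:
--     """
--     去除文本中所有 \added{...} 包裹（递归、正确处理花括号嵌套）。
--     """
--     i = 0
--     n = len(text)
--     out_chars: List[str] = []
--
--     added_prefix = "\\added{"
--     plen = len(added_prefix)
--
--     while i < n:
--         # 命中 \added{
--         if text.startswith(added_prefix, i):
--             i += plen  # 跳过 \added{
--             depth = 1
--             inner_start = i
--
--             # 寻找与 \added{ 匹配的右花括号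
--             while i < n and depth > 0:
--                 ch = text[i]
--                 if ch == '{':
--                     depth += 1
--                 elif ch == '}':
--                     depth -= 1
--                 i += 1
--
--             # depth==0 正常闭合；截取内部内容（不含最外层的花括号）
--             inner = text[inner_start:i-1] if depth == 0 else text[inner_start:]
--             # 递归去除内部可能嵌套的 \added{...}
--             out_chars.append(unwrap_added(inner))
--         else:
--             out_chars.append(text[i])
--             i += 1
--
--     return "".join(out_chars)
-- ===== SOURCE B (Python) =====
-- def unwrap_added(text: str) -> str:
--     """Single left-to-right scan: a stack of open-brace frames marks which
--     opening brace belongs to an \\added{ wrapper; those braces are dropped,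
--     everything else is copied through."""
--     out = []
--     stack = []  # True = brace opened by "\added{", False = plain '{'
--     i = 0
--     n = len(text)
--     while i < n:
--         if text.startswith("\\added{", i):
--             stack.append(True)
--             i += 7
--         else:
--             ch = text[i]
--             i += 1
--             if ch == '{':
--                 stack.append(False)
--                 out.append(ch)
--             elif ch == '}':
--                 if stack and stack.pop():
--                     pass  # closing brace of an \added{ wrapper: drop it
--                 else:
--                     out.append(ch)
--             else:
--                 out.append(ch)
--     return "".join(out)
-- ===== Notes on version B (the rewrite author's own statement) =====
-- stated objective: alternative
-- what changed: A recursively extracts each \added{...} body with a brace-matching sub-scan and re-runs itself on the extracted body; B makes one left-to-right pass with a stack of open-brace flags marking which braces belong to an \added{ wrapper (no recursion, no substring extraction).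
import Mathlib
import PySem

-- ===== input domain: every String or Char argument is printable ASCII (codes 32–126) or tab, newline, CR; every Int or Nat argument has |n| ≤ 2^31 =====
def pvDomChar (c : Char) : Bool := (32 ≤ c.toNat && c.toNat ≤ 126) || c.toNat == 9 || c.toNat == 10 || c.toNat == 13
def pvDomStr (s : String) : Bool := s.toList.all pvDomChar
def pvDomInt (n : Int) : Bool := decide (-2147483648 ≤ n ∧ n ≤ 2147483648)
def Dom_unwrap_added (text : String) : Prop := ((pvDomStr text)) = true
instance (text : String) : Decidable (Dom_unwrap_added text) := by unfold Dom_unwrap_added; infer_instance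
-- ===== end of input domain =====

-- B replaces A's recursive re-scan of each \added{...} body by one linear scan over the
-- text with a stack of open-brace flags (objective: alternative single-pass algorithm).

-- the literal "\added{" both programs look for
def pat : List Char := ['\\', 'a', 'd', 'd', 'e', 'd', '{']

-- Python's `ch == '{' / ch == '}'` depth update in A's inner loop
def step (c : Char) (d : Nat) : Nat := if c = '{' then d + 1 else if c = '}' then d - 1 else d

-- ===== PORT A =====
-- A's inner while loop: starting at depth d, walk until the brace depth hits 0;
-- returns (chars before the matching '}', some rest-after-it), or (all chars, none)
-- when it never closes (A's `depth == 0` test deciding the slice).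
def findClose : List Char → Nat → List Char × Option (List Char)
  | [], _ => ([], none)
  | c :: t, d =>
    if step c d = 0 then ([], some t)
    else (c :: (findClose t (step c d)).1, (findClose t (step c d)).2)

-- termination facts cited by unwrapA's decreasing_by
theorem fc_fst_len (u : List Char) : ∀ d, (findClose u d).1.length ≤ u.length := by
  induction u with
  | nil => intro d; simp [findClose]
  | cons c t ih =>
    intro d
    simp only [findClose]
    split
    · simp
    · simpa using Nat.succ_le_succ (ih _)

theorem fc_snd_len (u : List Char) : ∀ d r, (findClose u d).2 = some r → r.length < u.length := by
  induction u with
  | nil => intro d r h; simp [findClose] at h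
  | cons c t ih =>
    intro d r h
    simp only [findClose] at h
    split at h
    · simp only [Option.some.injEq] at h
      subst h; simp
    · exact Nat.lt_succ_of_lt (ih _ _ h)

theorem pat_len_le {cs : List Char} (h : pat.isPrefixOf cs) : 7 ≤ cs.length := by
  have := (List.isPrefixOf_iff_prefix.mp h).length_le
  simpa [pat] using this

-- A's outer while loop: on a hit skip "\added{", run the inner depth loop, recurse on
-- the inner text (and, when it closed, continue with the rest); else copy one char.
def unwrapA (cs : List Char) : List Char :=
  if h : pat.isPrefixOf cs then
    unwrapA (findClose (cs.drop 7) 1).1 ++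
      (match h2 : (findClose (cs.drop 7) 1).2 with
       | none => []
       | some r => unwrapA r)
  else
    match cs with
    | [] => []
    | c :: t => c :: unwrapA t
termination_by cs.length
decreasing_by
  · have h7 := pat_len_le h
    have := fc_fst_len (cs.drop 7) 1
    simp only [List.length_drop] at this
    omega
  · have h7 := pat_len_le h
    have := fc_snd_len (cs.drop 7) 1 r h2
    simp only [List.length_drop] at this
    omega
  · simp

def unwrap_added (text : String) : String := String.mk (unwrapA text.toList)

-- ===== PORT B =====
-- B's single scan: stack s of open-brace flags (true = brace opened by "\added{").
def scan (cs : List Char) (s : List Bool) : List Char :=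
  if h : pat.isPrefixOf cs then scan (cs.drop 7) (true :: s)
  else
    match cs with
    | [] => []
    | c :: t =>
      if c = '{' then c :: scan t (false :: s)
      else if c = '}' then
        match s with
        | [] => c :: scan t []
        | b :: s' => if b then scan t s' else c :: scan t s'
      else c :: scan t s
termination_by cs.length
decreasing_by
  all_goals first
    | (have h7 := pat_len_le h; simp only [List.length_drop]; omega)
    | simp

def unwrap_added_alt (text : String) : String := String.mk (scan text.toList [])

-- ===== PRECONDITION & SPEC =====
def Spec_unwrap_added (text : String) (out : String) : Prop := out = unwrap_added_alt text
instance (text : String) (out : String) : Decidable (Spec_unwrap_added text out) := by unfold Spec_unwrap_added; infer_instance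

-- ===== CLAIM (what is proved, stated in full; the proofs are below) =====
def Claim_equal_unwrap_added : Prop := ∀ (text : String), Dom_unwrap_added text → Spec_unwrap_added text (unwrap_added text)

-- ===== LEMMAS AND PROOFS =====

theorem fc_nil (d : Nat) : findClose [] d = ([], none) := rfl

theorem fc_cons (c : Char) (t : List Char) (d : Nat) :
    findClose (c :: t) d =
      if step c d = 0 then ([], some t)
      else (c :: (findClose t (step c d)).1, (findClose t (step c d)).2) := rfl

theorem step_open (d : Nat) : step '{' d = d + 1 := by simp [step]
theorem step_close (d : Nat) : step '}' d = d - 1 := by simp [step]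
theorem step_other {c : Char} (h1 : c ≠ '{') (h2 : c ≠ '}') (d : Nat) : step c d = d := by
  simp [step, h1, h2]

-- if the inner loop never closes, it consumed the whole input
theorem fc_none (u : List Char) : ∀ d a, findClose u d = (a, none) → a = u := by
  induction u with
  | nil => intro d a h; simpa using congrArg Prod.fst h.symm
  | cons c t ih =>
    intro d a h
    rw [fc_cons] at h
    split at h
    · exact absurd (congrArg Prod.snd h) (by simp)
    · rcases hfc : findClose t (step c d) with ⟨a1, R⟩
      rw [hfc] at h
      simp only [Prod.mk.injEq] at h
      obtain ⟨h1, h2⟩ := h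
      subst h2
      rw [← h1, ih _ _ hfc]

-- if it closes (from a positive depth), the input splits as a ++ '}' :: r
theorem fc_split (u : List Char) : ∀ d a r, 0 < d → findClose u d = (a, some r) → u = a ++ '}' :: r := by
  induction u with
  | nil => intro d a r _ h; simp [fc_nil] at h
  | cons c t ih =>
    intro d a r hd h
    rw [fc_cons] at h
    split at h
    · rename_i h0
      simp only [Prod.mk.injEq] at h
      obtain ⟨h1, h2⟩ := h
      have hc : c = '}' := by
        by_cases hb : c = '{'
        · rw [hb, step_open] at h0; omega
        · by_cases hb2 : c = '}'
          · exact hb2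
          · rw [step_other hb hb2] at h0; omega
      simp only [Option.some.injEq] at h2
      rw [← h1, hc, h2]
      rfl
    · rename_i h0
      rcases hfc : findClose t (step c d) with ⟨a1, R⟩
      rw [hfc] at h
      simp only [Prod.mk.injEq] at h
      obtain ⟨h1, h2⟩ := h
      subst h2
      rw [← h1]
      simpa using congrArg (List.cons c) (ih _ _ _ (Nat.pos_of_ne_zero h0) hfc)

-- re-running the inner loop on a reconstructed closed region gives the same split
theorem fc_recons (u : List Char) :
    ∀ d a r, 0 < d → findClose u d = (a, some r) →
      ∀ z, findClose (a ++ '}' :: z) d = (a, some z) := by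
  induction u with
  | nil => intro d a r _ h; simp [fc_nil] at h
  | cons c t ih =>
    intro d a r hd h z
    rw [fc_cons] at h
    split at h
    · rename_i h0
      simp only [Prod.mk.injEq, Option.some.injEq] at h
      obtain ⟨h1, _⟩ := h
      have hc : c = '}' := by
        by_cases hb : c = '{'
        · rw [hb, step_open] at h0; omega
        · by_cases hb2 : c = '}'
          · exact hb2
          · rw [step_other hb hb2] at h0; omega
      rw [← h1]
      simp only [List.nil_append]
      rw [fc_cons]
      have : step '}' d = 0 := by rw [step_close]; rw [hc, step_close] at h0; omega
      rw [if_pos this]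
    · rename_i h0
      rcases hfc : findClose t (step c d) with ⟨a1, R⟩
      rw [hfc] at h
      simp only [Prod.mk.injEq] at h
      obtain ⟨h1, h2⟩ := h
      subst h2
      rw [← h1]
      have := ih _ _ _ (Nat.pos_of_ne_zero h0) hfc z
      simp only [List.cons_append]
      rw [fc_cons, if_neg h0, this]

-- running at depth d+1 = run at depth d, then (if it closed) run the tail at depth 1
def glue : List Char × Option (List Char) → List Char × Option (List Char)
  | (a, none) => (a, none)
  | (a, some r) => (a ++ '}' :: (findClose r 1).1, (findClose r 1).2)

theorem fc_unfold (u : List Char) : ∀ d, 0 < d → findClose u (d + 1) = glue (findClose u d) := by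
  induction u with
  | nil => intro d _; simp [fc_nil, glue]
  | cons c t ih =>
    intro d hd
    by_cases hb : c = '{'
    · subst hb
      rw [fc_cons, fc_cons, step_open, step_open, if_neg (by omega), if_neg (by omega),
        ih (d + 1) (by omega)]
      rcases findClose t (d + 1) with ⟨a, _ | r⟩ <;> simp [glue]
    · by_cases hb2 : c = '}'
      · subst hb2
        by_cases hd1 : d = 1
        · subst hd1
          rw [fc_cons, fc_cons, step_close, step_close]
          simp [glue]
        · rw [fc_cons, fc_cons, step_close, step_close, if_neg (by omega), if_neg (by omega)]
          have heq : d + 1 - 1 = (d - 1) + 1 := by omega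
          rw [heq, ih (d - 1) (by omega)]
          rcases findClose t (d - 1) with ⟨a, _ | r⟩ <;> simp [glue]
      · rw [fc_cons, fc_cons, step_other hb hb2, step_other hb hb2,
          if_neg (by omega), if_neg (by omega), ih d hd]
        rcases findClose t d with ⟨a, _ | r⟩ <;> simp [glue]

-- running the inner loop across the literal "\added{" itself
theorem fc_pat (u : List Char) :
    findClose (pat ++ u) 1 = (pat ++ (findClose u 2).1, (findClose u 2).2) := by
  simp [pat, fc_cons, step]

-- prefix facts
theorem pat_not_prefix_open (t : List Char) : ¬ pat.isPrefixOf ('{' :: t) := by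
  simp [pat, List.isPrefixOf]

theorem pat_not_prefix_close (t : List Char) : ¬ pat.isPrefixOf ('}' :: t) := by
  simp [pat, List.isPrefixOf]

theorem pat_prefix_append (u : List Char) : pat.isPrefixOf (pat ++ u) := by
  exact List.isPrefixOf_iff_prefix.mpr (List.prefix_append _ _)

theorem pat_drop_append (u : List Char) : (pat ++ u).drop 7 = u := by
  simpa [pat] using List.drop_left pat u

theorem not_prefix_mono {c : Char} {a t : List Char} (hpre : a <+: t)
    (h : ¬ pat.isPrefixOf (c :: t)) : ¬ pat.isPrefixOf (c :: a) := by
  intro hp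
  exact h (List.isPrefixOf_iff_prefix.mpr
    ((List.isPrefixOf_iff_prefix.mp hp).trans ((List.cons_prefix_cons).mpr ⟨rfl, hpre⟩)))

-- unfold lemmas for unwrapA
theorem uA_nil : unwrapA [] = [] := by rw [unwrapA]; rfl

theorem uA_cons {c : Char} {t : List Char} (h : ¬ pat.isPrefixOf (c :: t)) :
    unwrapA (c :: t) = c :: unwrapA t := by
  rw [unwrapA, dif_neg h]

theorem uA_pat (u : List Char) :
    unwrapA (pat ++ u) =
      unwrapA (findClose u 1).1 ++
        (match (findClose u 1).2 with
         | none => []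
         | some r => unwrapA r) := by
  rw [unwrapA, dif_pos (pat_prefix_append u), pat_drop_append]
  rcases (findClose u 1).2 with _ | r <;> rfl

-- unfold lemmas for scan
theorem scan_nil (s : List Bool) : scan [] s = [] := by rw [scan]; rfl

theorem scan_pat (u : List Char) (s : List Bool) : scan (pat ++ u) s = scan u (true :: s) := by
  rw [scan, dif_pos (pat_prefix_append u), pat_drop_append]

theorem scan_open (t : List Char) (s : List Bool) :
    scan ('{' :: t) s = '{' :: scan t (false :: s) := by
  rw [scan, dif_neg (pat_not_prefix_open t)]
  rfl

theorem scan_close_nil (t : List Char) : scan ('}' :: t) [] = '}' :: scan t [] := by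
  rw [scan, dif_neg (pat_not_prefix_close t)]; rfl

theorem scan_close_cons (t : List Char) (b : Bool) (s : List Bool) :
    scan ('}' :: t) (b :: s) = if b then scan t s else '}' :: scan t s := by
  rw [scan, dif_neg (pat_not_prefix_close t)]; rfl

theorem scan_other {c : Char} {t : List Char} (h : ¬ pat.isPrefixOf (c :: t))
    (h1 : c ≠ '{') (h2 : c ≠ '}') (s : List Bool) : scan (c :: t) s = c :: scan t s := by
  rw [scan, dif_neg h]
  simp [h1, h2]

-- A's output over a closed region splits at the matching '}'
theorem reg2A : ∀ (N : Nat) (u : List Char), u.length ≤ N →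
    ∀ a r, findClose u 1 = (a, some r) → unwrapA u = unwrapA a ++ '}' :: unwrapA r := by
  intro N
  induction N with
  | zero =>
    intro u hlen a r h
    have : u = [] := List.eq_nil_of_length_eq_zero (Nat.le_zero.mp hlen)
    subst this
    simp [fc_nil] at h
  | succ N ih =>
    intro u hlen a r h
    by_cases hp : pat.isPrefixOf u
    · obtain ⟨w, rfl⟩ := List.isPrefixOf_iff_prefix.mp hp
      rw [fc_pat, fc_unfold w 1 one_pos] at h
      rcases h1 : findClose w 1 with ⟨a1, _ | ρ⟩
      · rw [h1] at h; simp [glue] at h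
      · rw [h1] at h
        rcases h2 : findClose ρ 1 with ⟨b1, _ | r'⟩
        · simp only [glue, h2, Prod.mk.injEq] at h
          exact absurd h.2 (by simp)
        · simp only [glue, h2, Prod.mk.injEq, Option.some.injEq] at h
          obtain ⟨ha, hr⟩ := h
          rw [hr] at h2
          have hw : w = a1 ++ '}' :: ρ := fc_split w 1 a1 ρ one_pos h1
          have hρ : ρ = b1 ++ '}' :: r := fc_split ρ 1 b1 r one_pos h2
          have hlρ : ρ.length ≤ N := by
            have := hlen
            rw [List.length_append, hw, List.length_append] at this
            simp [pat] at this
            omega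
          have hlb : (a1 ++ '}' :: b1).length ≤ N := by
            have := hlen
            rw [List.length_append, hw, hρ] at this
            simp [pat] at this
            simp
            omega
          rw [uA_pat, h1]
          have hIHρ := ih ρ hlρ b1 r h2
          have hrec := fc_recons w 1 a1 ρ one_pos h1 b1
          rw [← ha, uA_pat, hrec]
          simp only [hIHρ]
          simp
    · cases u with
      | nil => simp [fc_nil] at h
      | cons c t =>
        rw [fc_cons] at h
        by_cases h0 : step c 1 = 0
        · rw [if_pos h0] at h
          simp only [Prod.mk.injEq, Option.some.injEq] at h
          obtain ⟨ha, hr⟩ := h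
          have hc : c = '}' := by
            by_cases hb : c = '{'
            · rw [hb, step_open] at h0; omega
            · by_cases hb2 : c = '}'
              · exact hb2
              · rw [step_other hb hb2] at h0; omega
          subst hc
          rw [← ha, ← hr, uA_cons (pat_not_prefix_close t), uA_nil]
          simp
        · rw [if_neg h0] at h
          by_cases hb : c = '{'
          · subst hb
            rw [step_open] at h
            rcases h1 : findClose t 2 with ⟨a2, _ | r2⟩
            · rw [h1] at h; simp at h
            · rw [h1] at h
              simp only [Prod.mk.injEq, Option.some.injEq] at h
              obtain ⟨ha, hr⟩ := h
              rw [hr] at h1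
              rw [fc_unfold t 1 one_pos] at h1
              rcases h3 : findClose t 1 with ⟨a1, _ | ρ⟩
              · rw [h3] at h1; simp [glue] at h1
              · rw [h3] at h1
                rcases h4 : findClose ρ 1 with ⟨b1, _ | r4⟩
                · simp only [glue, h4, Prod.mk.injEq] at h1
                  exact absurd h1.2 (by simp)
                · simp only [glue, h4, Prod.mk.injEq, Option.some.injEq] at h1
                  obtain ⟨ha2, hr4⟩ := h1
                  rw [hr4] at h4
                  have ht : t = a1 ++ '}' :: ρ := fc_split t 1 a1 ρ one_pos h3
                  have hρ : ρ = b1 ++ '}' :: r := fc_split ρ 1 b1 r one_pos h4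
                  have hlt : t.length ≤ N := by simp at hlen; omega
                  have hlρ : ρ.length ≤ N := by
                    have := hlt; rw [ht, List.length_append] at this; simp at this; omega
                  have hlb : (a1 ++ '}' :: b1).length ≤ N := by
                    have := hlt; rw [ht, hρ] at this; simp at this ⊢; omega
                  rw [uA_cons (pat_not_prefix_open t), ih t hlt a1 ρ h3, ih ρ hlρ b1 r h4,
                    ← ha, ← ha2, uA_cons (pat_not_prefix_open _),
                    ih (a1 ++ '}' :: b1) hlb a1 b1 (fc_recons t 1 a1 ρ one_pos h3 b1)]
                  simp
          · by_cases hb2 : c = '}'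
            · rw [hb2, step_close] at h0; omega
            · rw [step_other hb hb2] at h
              rcases h1 : findClose t 1 with ⟨a1, _ | r1⟩
              · rw [h1] at h; simp at h
              · rw [h1] at h
                simp only [Prod.mk.injEq, Option.some.injEq] at h
                obtain ⟨ha, hr⟩ := h
                rw [hr] at h1
                have ht : t = a1 ++ '}' :: r := fc_split t 1 a1 r one_pos h1
                have hlt : t.length ≤ N := by simp at hlen; omega
                rw [uA_cons hp, ih t hlt a1 r h1, ← ha,
                  uA_cons (not_prefix_mono ⟨'}' :: r, ht.symm⟩ hp)]
                simp

-- B's scan with a non-empty stack: output over the current region, then the close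
-- emission of the top frame, then the scan of the remainder with the popped stack
theorem reg2 : ∀ (N : Nat) (cs : List Char), cs.length ≤ N → ∀ (b : Bool) (s : List Bool),
    (∀ a, findClose cs 1 = (a, none) → scan cs (b :: s) = scan a []) ∧
    (∀ a r, findClose cs 1 = (a, some r) →
      scan cs (b :: s) = scan a [] ++ (if b then [] else ['}']) ++ scan r s) := by
  intro N
  induction N with
  | zero =>
    intro cs hlen b s
    have : cs = [] := List.eq_nil_of_length_eq_zero (Nat.le_zero.mp hlen)
    subst this
    constructor
    · intro a hfc
      rw [fc_nil] at hfc
      simp only [Prod.mk.injEq] at hfc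
      rw [← hfc.1, scan_nil, scan_nil]
    · intro a r hfc
      rw [fc_nil] at hfc
      simp at hfc
  | succ N ih =>
    intro cs hlen b s
    by_cases hp : pat.isPrefixOf cs
    · obtain ⟨u, rfl⟩ := List.isPrefixOf_iff_prefix.mp hp
      have hlu : u.length ≤ N := by
        have := hlen; rw [List.length_append] at this; simp [pat] at this; omega
      constructor
      · intro a hfc
        rw [fc_pat, fc_unfold u 1 one_pos] at hfc
        rw [scan_pat]
        rcases h1 : findClose u 1 with ⟨a1, _ | ρ⟩
        · rw [h1] at hfc
          simp only [glue, Prod.mk.injEq] at hfc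
          have ha1 : a1 = u := fc_none u 1 a1 h1
          rw [((ih u hlu true (b :: s)).1) a1 h1, ← hfc.1, scan_pat,
            ((ih a1 (ha1 ▸ hlu) true []).1) a1 (ha1 ▸ h1)]
        · rw [h1] at hfc
          rcases h2 : findClose ρ 1 with ⟨b1, _ | r2⟩
          · simp only [glue, h2, Prod.mk.injEq] at hfc
            -- fc u 1 closed at ρ but fc ρ 1 never closes: b1 = ρ
            obtain ⟨ha, _⟩ := hfc
            have hb1 : b1 = ρ := fc_none ρ 1 b1 h2
            have hu : u = a1 ++ '}' :: ρ := fc_split u 1 a1 ρ one_pos h1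
            have hlρ : ρ.length ≤ N := by
              have := hlu; rw [hu, List.length_append] at this; simp at this; omega
            have hlX : (a1 ++ '}' :: b1).length ≤ N := by
              rw [hb1, ← hu]; exact hlu
            rw [((ih u hlu true (b :: s)).2) a1 ρ h1,
              ((ih ρ hlρ b s).1) b1 h2,
              ← ha, scan_pat,
              ((ih (a1 ++ '}' :: b1) hlX true []).2) a1 b1 (fc_recons u 1 a1 ρ one_pos h1 b1)]
          · simp only [glue, h2, Prod.mk.injEq] at hfc
            exact absurd hfc.2 (by simp)
      · intro a r hfc
        rw [fc_pat, fc_unfold u 1 one_pos] at hfc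
        rw [scan_pat]
        rcases h1 : findClose u 1 with ⟨a1, _ | ρ⟩
        · rw [h1] at hfc; simp [glue] at hfc
        · rw [h1] at hfc
          rcases h2 : findClose ρ 1 with ⟨b1, _ | r2⟩
          · simp only [glue, h2, Prod.mk.injEq] at hfc
            exact absurd hfc.2 (by simp)
          · simp only [glue, h2, Prod.mk.injEq, Option.some.injEq] at hfc
            obtain ⟨ha, hr⟩ := hfc
            rw [hr] at h2
            have hu : u = a1 ++ '}' :: ρ := fc_split u 1 a1 ρ one_pos h1
            have hρ : ρ = b1 ++ '}' :: r := fc_split ρ 1 b1 r one_pos h2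
            have hlρ : ρ.length ≤ N := by
              have := hlu; rw [hu, List.length_append] at this; simp at this; omega
            have hlX : (a1 ++ '}' :: b1).length ≤ N := by
              have := hlu; rw [hu, hρ] at this; simp at this ⊢; omega
            rw [((ih u hlu true (b :: s)).2) a1 ρ h1,
              ((ih ρ hlρ b s).2) b1 r h2,
              ← ha, scan_pat,
              ((ih (a1 ++ '}' :: b1) hlX true []).2) a1 b1 (fc_recons u 1 a1 ρ one_pos h1 b1)]
            simp
    · cases cs with
      | nil =>
        constructor
        · intro a hfc
          rw [fc_nil] at hfc
          simp only [Prod.mk.injEq] at hfc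
          rw [← hfc.1, scan_nil, scan_nil]
        · intro a r hfc
          rw [fc_nil] at hfc
          simp at hfc
      | cons c t =>
        have hlt : t.length ≤ N := by simp at hlen; omega
        by_cases hb : c = '{'
        · subst hb
          have hfcs : findClose ('{' :: t) 1 =
              ('{' :: (findClose t 2).1, (findClose t 2).2) := by
            rw [fc_cons, step_open, if_neg (by omega)]
          rw [hfcs, fc_unfold t 1 one_pos]
          rcases h3 : findClose t 1 with ⟨a1, _ | ρ⟩
          · have ha1 : a1 = t := fc_none t 1 a1 h3
            constructor
            · intro a hfc
              simp only [glue, Prod.mk.injEq] at hfc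
              rw [scan_open, ((ih t hlt false (b :: s)).1) a1 h3, ← hfc.1, scan_open,
                ((ih a1 (ha1 ▸ hlt) false []).1) a1 (ha1 ▸ h3)]
            · intro a r hfc
              simp [glue] at hfc
          · rcases h4 : findClose ρ 1 with ⟨b1, _ | r2⟩
            · have hb1 : b1 = ρ := fc_none ρ 1 b1 h4
              have ht : t = a1 ++ '}' :: ρ := fc_split t 1 a1 ρ one_pos h3
              have hlρ : ρ.length ≤ N := by
                have := hlt; rw [ht, List.length_append] at this; simp at this; omega
              have hlX : (a1 ++ '}' :: b1).length ≤ N := by rw [hb1, ← ht]; exact hlt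
              constructor
              · intro a hfc
                simp only [glue, h4, Prod.mk.injEq] at hfc
                rw [scan_open, ((ih t hlt false (b :: s)).2) a1 ρ h3,
                  ((ih ρ hlρ b s).1) b1 h4, ← hfc.1, scan_open,
                  ((ih (a1 ++ '}' :: b1) hlX false []).2) a1 b1 (fc_recons t 1 a1 ρ one_pos h3 b1)]
              · intro a r hfc
                simp only [glue, h4, Prod.mk.injEq] at hfc
                exact absurd hfc.2 (by simp)
            · have ht : t = a1 ++ '}' :: ρ := fc_split t 1 a1 ρ one_pos h3
              have hρ : ρ = b1 ++ '}' :: r2 := fc_split ρ 1 b1 r2 one_pos h4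
              have hlρ : ρ.length ≤ N := by
                have := hlt; rw [ht, List.length_append] at this; simp at this; omega
              have hlX : (a1 ++ '}' :: b1).length ≤ N := by
                have := hlt; rw [ht, hρ] at this; simp at this ⊢; omega
              constructor
              · intro a hfc
                simp only [glue, h4, Prod.mk.injEq] at hfc
                exact absurd hfc.2 (by simp)
              · intro a r hfc
                simp only [glue, h4, Prod.mk.injEq, Option.some.injEq] at hfc
                obtain ⟨ha, hr⟩ := hfc
                rw [hr] at h4
                rw [scan_open, ((ih t hlt false (b :: s)).2) a1 ρ h3,
                  ((ih ρ hlρ b s).2) b1 r h4, ← ha, scan_open,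
                  ((ih (a1 ++ '}' :: b1) hlX false []).2) a1 b1 (fc_recons t 1 a1 ρ one_pos h3 b1)]
                simp
        · by_cases hb2 : c = '}'
          · subst hb2
            have hfcs : findClose ('}' :: t) 1 = ([], some t) := by
              rw [fc_cons, step_close, if_pos (by omega)]
            rw [hfcs]
            constructor
            · intro a hfc; simp at hfc
            · intro a r hfc
              simp only [Prod.mk.injEq, Option.some.injEq] at hfc
              obtain ⟨ha, hr⟩ := hfc
              rw [scan_close_cons, ← ha, ← hr, scan_nil]
              cases b <;> simp
          · have hfcs : findClose (c :: t) 1 =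
                (c :: (findClose t 1).1, (findClose t 1).2) := by
              rw [fc_cons, step_other hb hb2, if_neg (by omega)]
            rw [hfcs]
            rcases h3 : findClose t 1 with ⟨a1, _ | ρ⟩
            · have ha1 : a1 = t := fc_none t 1 a1 h3
              constructor
              · intro a hfc
                simp only [Prod.mk.injEq] at hfc
                rw [scan_other hp hb hb2, ((ih t hlt b s).1) a1 h3, ← hfc.1,
                  scan_other (ha1 ▸ hp) hb hb2]
              · intro a r hfc; simp at hfc
            · have ht : t = a1 ++ '}' :: ρ := fc_split t 1 a1 ρ one_pos h3
              constructor
              · intro a hfc; simp at hfc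
              · intro a r hfc
                simp only [Prod.mk.injEq, Option.some.injEq] at hfc
                obtain ⟨ha, hr⟩ := hfc
                rw [hr] at h3
                rw [scan_other hp hb hb2, ((ih t hlt b s).2) a1 r h3, ← ha,
                  scan_other (not_prefix_mono ⟨'}' :: r, (hr ▸ ht).symm⟩ hp) hb hb2]
                simp

-- the two ports agree on every character list
theorem main : ∀ (N : Nat) (cs : List Char), cs.length ≤ N → scan cs [] = unwrapA cs := by
  intro N
  induction N with
  | zero =>
    intro cs hlen
    have : cs = [] := List.eq_nil_of_length_eq_zero (Nat.le_zero.mp hlen)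
    subst this
    rw [scan_nil, uA_nil]
  | succ N ih =>
    intro cs hlen
    by_cases hp : pat.isPrefixOf cs
    · obtain ⟨u, rfl⟩ := List.isPrefixOf_iff_prefix.mp hp
      have hlu : u.length ≤ N := by
        have := hlen; rw [List.length_append] at this; simp [pat] at this; omega
      rw [scan_pat, uA_pat]
      rcases h1 : findClose u 1 with ⟨a, _ | r⟩
      · have ha : a = u := fc_none u 1 a h1
        rw [((reg2 u.length u le_rfl true []).1) a h1, ih a (ha ▸ hlu)]
        simp
      · have hu : u = a ++ '}' :: r := fc_split u 1 a r one_pos h1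
        have hla : a.length ≤ N := by
          have := hlu; rw [hu, List.length_append] at this; simp at this; omega
        have hlr : r.length ≤ N := by
          have := hlu; rw [hu, List.length_append] at this; simp at this; omega
        rw [((reg2 u.length u le_rfl true []).2) a r h1, ih a hla, ih r hlr]
        simp
    · cases cs with
      | nil => rw [scan_nil, uA_nil]
      | cons c t =>
        have hlt : t.length ≤ N := by simp at hlen; omega
        by_cases hb : c = '{'
        · subst hb
          rw [scan_open, uA_cons hp]
          rcases h1 : findClose t 1 with ⟨a, _ | r⟩
          · have ha : a = t := fc_none t 1 a h1
            rw [((reg2 t.length t le_rfl false []).1) a h1, ih a (ha ▸ hlt), ha]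
          · have ht : t = a ++ '}' :: r := fc_split t 1 a r one_pos h1
            have hla : a.length ≤ N := by
              have := hlt; rw [ht, List.length_append] at this; simp at this; omega
            have hlr : r.length ≤ N := by
              have := hlt; rw [ht, List.length_append] at this; simp at this; omega
            rw [((reg2 t.length t le_rfl false []).2) a r h1, ih a hla, ih r hlr,
              reg2A t.length t le_rfl a r h1]
            simp
        · by_cases hb2 : c = '}'
          · subst hb2
            rw [scan_close_nil, uA_cons hp, ih t hlt]
          · rw [scan_other hp hb hb2, uA_cons hp, ih t hlt]

-- ===== VERDICT (by name: the statement is the Claim_ definition above) =====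
theorem unwrap_added_spec : Claim_equal_unwrap_added := by
  intro text _
  unfold Spec_unwrap_added unwrap_added unwrap_added_alt
  rw [main text.toList.length text.toList le_rfl]
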